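-- pv_equiv track=rewrite | github.com/mrblue223/TryHackMe | Rabbit_hole/e2.py | reconstruct_sql_query_from_fragments
-- ===== SOURCE A (Python) =====
-- def reconstruct_sql_query_from_fragments(fragmented_lines):
--     """
--     Reconstructs a full SQL query from a list of fragmented lines,
--     based on the expected structure of the admin login query from the CTF.
--
--     Args:
--         fragmented_lines (list of str): A list of strings, where each string
--                                          is a fragmented piece of the SQL query.
--
--     Returns:
--         str: The reconstructed full SQL query, or an empty string if not found.
--     """
--     full_query = ""
--     found_query_start = False
--
--     # Iterate through the fragmented lines
--     for line in fragmented_lines: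
--         # Heuristic to identify if it's the beginning of the admin's query
--         # This matches the logic used in the original CTF writeup output.
--         if line.startswith("SELECT * from us") or \
--            line.startswith("ers where (usern") or \
--            line.startswith("ame= 'admin' and") or \
--            line.startswith(" password=md5('"):
--             full_query += line
--             found_query_start = True
--         elif found_query_start:
--             # If we've found the start, continue appending subsequent lines
--             full_query += line
--         # You might add an 'else' here if you want to handle lines that
--         # are not part of the target query, e.g., for debugging.
--
--     return full_query
-- ===== SOURCE B (Python) =====
-- _START_PREFIXES = ("SELECT * from us", "ers where (usern",
--                    "ame= 'admin' and", " password=md5('")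
--
--
-- def _is_query_start(line):
--     return any(line.startswith(p) for p in _START_PREFIXES)
--
--
-- def reconstruct_sql_query_from_fragments(fragmented_lines):
--     for i, line in enumerate(fragmented_lines):
--         if _is_query_start(line):
--             return ''.join(fragmented_lines[i:])
--     return ""
-- ===== Notes on version B (the rewrite author's own statement) =====
-- stated objective: simpler
-- what changed: Replaces A's boolean-flag accumulator loop (append-while-flag-set) with a two-step decomposition: find the index of the first line matching any start prefix, then return ''.join of the slice from that index.
import Mathlib
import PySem

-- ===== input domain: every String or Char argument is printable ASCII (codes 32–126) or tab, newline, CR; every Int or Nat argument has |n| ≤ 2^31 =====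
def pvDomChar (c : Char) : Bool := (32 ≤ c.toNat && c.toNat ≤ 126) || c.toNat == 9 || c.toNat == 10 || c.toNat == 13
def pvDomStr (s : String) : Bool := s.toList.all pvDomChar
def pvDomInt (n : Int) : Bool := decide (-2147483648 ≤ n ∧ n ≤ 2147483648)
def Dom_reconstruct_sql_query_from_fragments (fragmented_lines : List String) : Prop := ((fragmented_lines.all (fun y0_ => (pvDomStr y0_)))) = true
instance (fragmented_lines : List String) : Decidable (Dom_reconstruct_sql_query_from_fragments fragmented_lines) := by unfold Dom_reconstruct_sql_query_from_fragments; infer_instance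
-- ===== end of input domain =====

-- B replaces A's boolean-flag accumulator with a two-step decomposition: find the
-- first matching line's index, then join the suffix from there (objective: simpler).
-- ===== PORT A =====
-- heuristic prefix test, as A's four chained `startswith` disjuncts
def pvIsStartA (line : String) : Bool :=
  PySem.Str.startswith line "SELECT * from us" ||
  PySem.Str.startswith line "ers where (usern" ||
  PySem.Str.startswith line "ame= 'admin' and" ||
  PySem.Str.startswith line " password=md5('"

-- the loop state is (full_query, found_query_start); string concatenation is kept
-- exact by accumulating the code points (List Char) and packing at the end
def reconstruct_sql_query_from_fragments (fragmented_lines : List String) : String :=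
  let r := fragmented_lines.foldl
    (fun (st : List Char × Bool) line =>
      if pvIsStartA line then (st.1 ++ line.toList, true)
      else if st.2 then (st.1 ++ line.toList, st.2)
      else st)
    ([], false)
  String.ofList r.1

-- ===== PORT B =====
def pvStartPrefixesB : List String :=
  ["SELECT * from us", "ers where (usern", "ame= 'admin' and", " password=md5('"]

def pvIsStartB (line : String) : Bool :=
  pvStartPrefixesB.any (fun p => PySem.Str.startswith line p)

-- index of the first matching line (the enumerate loop with early return),
-- then ''.join of the slice fragmented_lines[i:]
def reconstruct_sql_query_from_fragments_alt (fragmented_lines : List String) : String :=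
  match fragmented_lines.findIdx? pvIsStartB with
  | some i => PySem.Str.join "" (fragmented_lines.drop i)
  | none => ""

-- ===== PRECONDITION & SPEC =====
def Spec_reconstruct_sql_query_from_fragments (fragmented_lines : List String) (out : String) : Prop := out = reconstruct_sql_query_from_fragments_alt fragmented_lines
instance (fragmented_lines : List String) (out : String) : Decidable (Spec_reconstruct_sql_query_from_fragments fragmented_lines out) := by unfold Spec_reconstruct_sql_query_from_fragments; infer_instance

-- ===== CLAIM (what is proved, stated in full; the proofs are below) =====
def Claim_equal_reconstruct_sql_query_from_fragments : Prop := ∀ (fragmented_lines : List String), Dom_reconstruct_sql_query_from_fragments fragmented_lines → Spec_reconstruct_sql_query_from_fragments fragmented_lines (reconstruct_sql_query_from_fragments fragmented_lines)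

-- ===== LEMMAS AND PROOFS =====

-- A's loop body, named for the lemmas
def pvStepA (st : List Char × Bool) (line : String) : List Char × Bool :=
  if pvIsStartA line then (st.1 ++ line.toList, true)
  else if st.2 then (st.1 ++ line.toList, st.2)
  else st

theorem pvIsStart_eq (l : String) : pvIsStartA l = pvIsStartB l := by
  simp [pvIsStartA, pvIsStartB, pvStartPrefixesB, Bool.or_assoc]

-- once the flag is set, every remaining line is appended unconditionally
theorem pvFoldA_flag (ls : List String) (acc : List Char) :
    ls.foldl pvStepA (acc, true) = (acc ++ (ls.map String.toList).flatten, true) := by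
  induction ls generalizing acc with
  | nil => simp
  | cons l ls ih =>
    simp only [List.foldl_cons, pvStepA]
    split_ifs <;> simp [ih, List.append_assoc]

-- joining with the empty separator is flatten
theorem pvJoinChars (parts : List (List Char)) :
    PySem.Chars.join [] parts = parts.flatten := by
  induction parts with
  | nil => simp [PySem.Chars.join_nil]
  | cons p rest ih =>
    cases rest with
    | nil => simp [PySem.Chars.join_singleton]
    | cons q rest' =>
      rw [PySem.Chars.join_cons_cons, ih]
      simp

theorem pvMain (ls : List String) :
    reconstruct_sql_query_from_fragments ls = reconstruct_sql_query_from_fragments_alt ls := by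
  induction ls with
  | nil => rfl
  | cons l ls ih =>
    show String.ofList ((l :: ls).foldl pvStepA ([], false)).1 = _
    by_cases h : pvIsStartA l = true
    · rw [List.foldl_cons]
      have hstep : pvStepA ([], false) l = (l.toList, true) := by simp [pvStepA, h]
      rw [hstep, pvFoldA_flag]
      have hb : pvIsStartB l = true := pvIsStart_eq l ▸ h
      simp only [reconstruct_sql_query_from_fragments_alt, List.findIdx?_cons, hb,
        if_pos, List.drop_zero]
      apply String.toList_inj.mp
      simp [pvJoinChars]
    · have hstep : pvStepA ([], false) l = ([], false) := by simp [pvStepA, h]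
      rw [List.foldl_cons, hstep]
      have hb : pvIsStartB l = false := by
        rw [← pvIsStart_eq]; simpa using h
      have ih' : String.ofList (ls.foldl pvStepA ([], false)).1
          = reconstruct_sql_query_from_fragments_alt ls := ih
      rw [ih']
      simp only [reconstruct_sql_query_from_fragments_alt, List.findIdx?_cons, hb]
      cases hfi : ls.findIdx? pvIsStartB with
      | none => simp
      | some i => simp

-- ===== VERDICT (by name: the statement is the Claim_ definition above) =====
theorem reconstruct_sql_query_from_fragments_spec : Claim_equal_reconstruct_sql_query_from_fragments := by
  intro ls _
  exact pvMain ls
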